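-- pv_equiv track=rewrite | github.com/sebastian-ml/crypto-analysis | script.py | get_date_ranges
-- ===== SOURCE A (Python) =====
-- seconds_in_day = 86400
--
-- max_days_per_fetch = 100  # Coinmarketcap day limit per request
--
-- def get_date_ranges(ranges, start_date, end_date):
--     if ranges == 1:
--         return [{'start_date': start_date, 'end_date': end_date}]
--
--     days_to_add = max_days_per_fetch - 1
--     date_ranges = []
--
--     for i in range(ranges):
--         current_start = start_date + (i * days_to_add * seconds_in_day) + \
--                         (0 if i == 0 else seconds_in_day)
--         current_end = start_date + ((i + 1) * days_to_add * seconds_in_day)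
--
--         if i == ranges - 1:
--             current_end = end_date
--
--         date_ranges.append(
--             {'start_date': current_start, 'end_date': current_end}
--         )
--
--     return date_ranges
-- ===== SOURCE B (Python) =====
-- seconds_in_day = 86400
--
-- max_days_per_fetch = 100  # Coinmarketcap day limit per request
--
--
-- def get_date_ranges(ranges, start_date, end_date):
--     # Incremental cursor version: no special case for ranges == 1 and no
--     # per-index closed-form arithmetic.  First walk the interval once,
--     # carrying the next boundaries forward in the cursors s / e, then
--     # package the collected boundaries as dicts.
--     step = (max_days_per_fetch - 1) * seconds_in_day
--     starts = []
--     ends = []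
--     s = start_date
--     e = start_date + step
--     while len(starts) < ranges:
--         starts.append(s)
--         ends.append(e)
--         s = e + seconds_in_day
--         e += step
--     if ends:
--         ends[-1] = end_date
--     return [{'start_date': b, 'end_date': c} for b, c in zip(starts, ends)]
-- ===== Notes on version B (the rewrite author's own statement) =====
-- stated objective: simpler
-- what changed: Drops the redundant ranges==1 special case and replaces the per-index closed-form boundary arithmetic by a single loop that carries the next start/end boundaries forward in running cursor variables.
import Mathlib
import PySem

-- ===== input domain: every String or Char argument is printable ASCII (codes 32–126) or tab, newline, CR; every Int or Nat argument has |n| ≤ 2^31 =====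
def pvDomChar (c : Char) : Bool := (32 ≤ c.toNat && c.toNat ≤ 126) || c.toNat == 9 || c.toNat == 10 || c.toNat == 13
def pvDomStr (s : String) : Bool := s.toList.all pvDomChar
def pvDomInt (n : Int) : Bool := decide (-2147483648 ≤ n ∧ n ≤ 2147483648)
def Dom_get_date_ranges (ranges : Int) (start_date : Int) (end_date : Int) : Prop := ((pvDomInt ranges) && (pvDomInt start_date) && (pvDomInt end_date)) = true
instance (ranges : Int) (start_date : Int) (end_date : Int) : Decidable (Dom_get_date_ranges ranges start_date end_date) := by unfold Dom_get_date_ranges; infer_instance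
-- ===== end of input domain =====

-- B drops A's redundant ranges==1 special case and maintains running start/end cursors
-- instead of recomputing each boundary from the loop index (objective: simpler).

def seconds_in_day : Int := 86400

def max_days_per_fetch : Int := 100

-- ===== PORT A =====
def get_date_ranges (ranges : Int) (start_date : Int) (end_date : Int) : List (List (String × Int)) :=
  if ranges == 1 then
    [[("start_date", start_date), ("end_date", end_date)]]
  else
    let days_to_add := max_days_per_fetch - 1
    (PySem.List.pyRange 0 ranges 1).foldl (fun date_ranges i =>
      let current_start := start_date + (i * days_to_add * seconds_in_day) +
                           (if i == 0 then 0 else seconds_in_day)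
      let current_end := start_date + ((i + 1) * days_to_add * seconds_in_day)
      let current_end := if i == ranges - 1 then end_date else current_end
      date_ranges ++ [[("start_date", current_start), ("end_date", current_end)]]) []

-- ===== PORT B =====
-- B's while loop 'while len(starts) < ranges' runs exactly max(ranges,0) times
-- (starts grows by one per iteration); ported as recursion on that remaining count.
def gdr_bounds (remaining : Nat) (s : Int) (e : Int) (step : Int)
    (starts : List Int) (ends : List Int) : List Int × List Int :=
  match remaining with
  | 0 => (starts, ends)
  | Nat.succ k =>
      gdr_bounds k (e + seconds_in_day) (e + step) step (starts ++ [s]) (ends ++ [e])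

def get_date_ranges_alt (ranges : Int) (start_date : Int) (end_date : Int) : List (List (String × Int)) :=
  let step := (max_days_per_fetch - 1) * seconds_in_day
  let be := gdr_bounds ranges.toNat start_date (start_date + step) step [] []
  let starts := be.1
  -- 'ends[-1] = end_date' on a nonempty list, ported as dropLast ++ [end_date]
  let ends := if be.2.isEmpty then be.2 else be.2.dropLast ++ [end_date]
  (starts.zip ends).map (fun p => [("start_date", p.1), ("end_date", p.2)])

-- ===== PRECONDITION & SPEC =====
def Spec_get_date_ranges (ranges : Int) (start_date : Int) (end_date : Int) (out : List (List (String × Int))) : Prop := out = get_date_ranges_alt ranges start_date end_date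
instance (ranges : Int) (start_date : Int) (end_date : Int) (out : List (List (String × Int))) : Decidable (Spec_get_date_ranges ranges start_date end_date out) := by unfold Spec_get_date_ranges; infer_instance

-- ===== CLAIM (what is proved, stated in full; the proofs are below) =====
def Claim_equal_get_date_ranges : Prop := ∀ (ranges : Int) (start_date : Int) (end_date : Int), Dom_get_date_ranges ranges start_date end_date → Spec_get_date_ranges ranges start_date end_date (get_date_ranges ranges start_date end_date)

-- ===== LEMMAS AND PROOFS =====

-- closed form shared by both ports: entry j starts at s (j = 0) / e + (j-1)*step + sid
-- (j >= 1) and ends at e + j*step except the final entry, which ends at end_date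
def gdr_entry (n : Nat) (s e step end_date : Int) (j : Nat) : List (String × Int) :=
  [("start_date", if j = 0 then s else e + ((j : Int) - 1) * step + seconds_in_day),
   ("end_date", if j = n - 1 then end_date else e + (j : Int) * step)]

def startF (s e step : Int) (j : Nat) : Int :=
  if j = 0 then s else e + ((j : Int) - 1) * step + seconds_in_day

def endF (e step : Int) (j : Nat) : Int := e + (j : Int) * step

theorem startF_shift (s e step : Int) (j : Nat) :
    startF s e step (j + 1) = startF (e + seconds_in_day) (e + step) step j := by
  rcases Nat.eq_zero_or_pos j with hj0 | hj0
  · simp [startF, hj0]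
  · simp [startF, show ¬ (j = 0) by omega]
    ring

theorem endF_shift (e step : Int) (j : Nat) :
    endF e step (j + 1) = endF (e + step) step j := by
  simp [endF]; ring

theorem gdr_bounds_eq_map (n : Nat) (s e step : Int) (starts ends : List Int) :
    gdr_bounds n s e step starts ends
    = (starts ++ (List.range n).map (startF s e step),
       ends ++ (List.range n).map (endF e step)) := by
  induction n generalizing s e starts ends with
  | zero => simp [gdr_bounds]
  | succ k ih =>
      rw [gdr_bounds, ih, List.range_succ_eq_map]
      have h1 : (List.range k).map (startF (e + seconds_in_day) (e + step) step)
          = (List.range k).map (startF s e step ∘ Nat.succ) := by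
        apply List.map_congr_left
        intro j _
        exact (startF_shift s e step j).symm
      have h2 : (List.range k).map (endF (e + step) step)
          = (List.range k).map (endF e step ∘ Nat.succ) := by
        apply List.map_congr_left
        intro j _
        exact (endF_shift e step j).symm
      rw [h1, h2]
      simp [startF, endF, List.map_map]

-- B's result in the shared closed form
theorem alt_eq_map (ranges start_date end_date : Int) :
    get_date_ranges_alt ranges start_date end_date
    = (List.range ranges.toNat).map
        (gdr_entry ranges.toNat start_date
          (start_date + (max_days_per_fetch - 1) * seconds_in_day)
          ((max_days_per_fetch - 1) * seconds_in_day) end_date) := by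
  simp only [get_date_ranges_alt, gdr_bounds_eq_map, List.nil_append]
  rcases Nat.eq_zero_or_pos ranges.toNat with h0 | h0
  · simp [h0]
  · obtain ⟨m, hm⟩ : ∃ m, ranges.toNat = m + 1 := ⟨ranges.toNat - 1, by omega⟩
    rw [hm]
    have hne : ¬ ((List.range (m + 1)).map
        (endF (start_date + (max_days_per_fetch - 1) * seconds_in_day)
          ((max_days_per_fetch - 1) * seconds_in_day))).isEmpty = true := by
      simp
    rw [if_neg hne]
    have hdrop : ((List.range (m + 1)).map
        (endF (start_date + (max_days_per_fetch - 1) * seconds_in_day)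
          ((max_days_per_fetch - 1) * seconds_in_day))).dropLast
        = (List.range m).map
            (endF (start_date + (max_days_per_fetch - 1) * seconds_in_day)
              ((max_days_per_fetch - 1) * seconds_in_day)) := by
      rw [List.range_succ, List.map_append, List.dropLast_append_of_ne_nil] <;> simp
    rw [hdrop]
    have hends : (List.range m).map
          (endF (start_date + (max_days_per_fetch - 1) * seconds_in_day)
            ((max_days_per_fetch - 1) * seconds_in_day)) ++ [end_date]
        = (List.range (m + 1)).map (fun j =>
            if j = m then end_date
            else endF (start_date + (max_days_per_fetch - 1) * seconds_in_day)
              ((max_days_per_fetch - 1) * seconds_in_day) j) := by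
      rw [List.range_succ, List.map_append]
      congr 1
      · apply List.map_congr_left
        intro j hj
        simp only [List.mem_range] at hj
        simp [show ¬ (j = m) by omega]
      · simp
    rw [hends, List.zip_map']
    rw [List.map_map]
    apply List.map_congr_left
    intro j hj
    simp only [List.mem_range] at hj
    simp only [Function.comp, gdr_entry, startF, Nat.add_sub_cancel, endF]

-- A's per-index entry equals the shared closed-form entry
theorem entry_agree (ranges start_date end_date : Int) (hr : 1 ≤ ranges) (j : Nat)
    (hj : j < ranges.toNat) :
    (let i : Int := (j : Int)
     let days_to_add := max_days_per_fetch - 1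
     let current_start := start_date + (i * days_to_add * seconds_in_day) +
                          (if i == 0 then 0 else seconds_in_day)
     let current_end := start_date + ((i + 1) * days_to_add * seconds_in_day)
     let current_end := if i == ranges - 1 then end_date else current_end
     [("start_date", current_start), ("end_date", current_end)])
    = gdr_entry ranges.toNat start_date
        (start_date + (max_days_per_fetch - 1) * seconds_in_day)
        ((max_days_per_fetch - 1) * seconds_in_day) end_date j := by
  simp only [gdr_entry, List.cons.injEq, Prod.mk.injEq, and_true, true_and]
  constructor
  · rcases Nat.eq_zero_or_pos j with hj0 | hj0
    · simp [hj0]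
    · simp [show ¬ ((j : Int) == 0) = true by simp; omega, show ¬ (j = 0) by omega]
      ring
  · by_cases hlast : (j : Int) = ranges - 1
    · have h2 : j = ranges.toNat - 1 := by omega
      subst h2
      simp [hlast]
    · simp [hlast, show ¬ (j = ranges.toNat - 1) by omega]
      ring

theorem get_date_ranges_eq (ranges start_date end_date : Int) :
    get_date_ranges ranges start_date end_date = get_date_ranges_alt ranges start_date end_date := by
  rw [alt_eq_map]
  by_cases h1 : ranges = 1
  · subst h1
    simp [get_date_ranges, gdr_entry, seconds_in_day, max_days_per_fetch, List.range_succ]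
  · have hne : ¬ (ranges == 1) = true := by simp [h1]
    rw [get_date_ranges, if_neg hne]
    rw [PySem.List.foldl_append_singleton_eq_map, List.nil_append]
    rcases le_or_gt ranges 0 with hr | hr
    · rw [PySem.List.pyRange_one_eq_nil (by omega)]
      have : ranges.toNat = 0 := by omega
      simp [this]
    · rw [PySem.List.pyRange_one]
      simp only [Int.sub_zero, List.map_map]
      apply List.map_congr_left
      intro j hj
      simp only [List.mem_range] at hj
      have := entry_agree ranges start_date end_date (by omega) j hj
      simpa using this

-- ===== VERDICT (by name: the statement is the Claim_ definition above) =====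
theorem get_date_ranges_spec : Claim_equal_get_date_ranges := by
  intro ranges start_date end_date _
  unfold Spec_get_date_ranges
  exact get_date_ranges_eq ranges start_date end_date
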